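-- pv_equiv track=rewrite | github.com/rohit-konda/kround | Code/1roundMC.py | reduce_res
-- ===== SOURCE A (Python) =====
-- def checknull(p):
--     return all([e == (0, 0) for e in p])
--
-- def checknobrnull(p):
--     for i in range(len(p)-1):
--         if p[i] == (1, 0) and p[i+1] == (0, 0):
--             return True
--     return False
--
-- def checknonullopt(p):
--     for i in range(len(p)-1):
--         if p[i] == (0, 0) and p[i+1] == (0, 1):
--             return True
--     return False
--
-- def checknobothnull(p):
--     for i in range(len(p)-1):
--         if p[i] == (0, 0) and p[i+1] == (1, 1):
--             return True
--         elif p[i] == (1, 1) and p[i+1] == (0, 0):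
--             return True
--     return False
--
-- def reduce_res(partition):
--     for i, p in enumerate(partition):
--         if checknull(p) or \
--            checknobrnull(p) or \
--            checknobothnull(p) or \
--            checknonullopt(p):
--             partition[i] = None
--
--
--     return [p for p in partition if p is not None], partition
-- ===== SOURCE B (Python) =====
-- FORBIDDEN = {((1, 0), (0, 0)), ((0, 0), (0, 1)), ((0, 0), (1, 1)), ((1, 1), (0, 0))}
--
-- def reduce_res(partition):
--     # single fused pass per sub-partition; mutates `partition` in place like A
--     for i, p in enumerate(partition):
--         all_zero = True
--         found = False
--         prev = None
--         for e in p: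
--             if e != (0, 0):
--                 all_zero = False
--             if prev is not None and (prev, e) in FORBIDDEN:
--                 found = True
--             prev = e
--         if all_zero or found:
--             partition[i] = None
--     return [p for p in partition if p is not None], partition
-- ===== Notes on version B (the rewrite author's own statement) =====
-- stated objective: simpler
-- what changed: Replaces A's four separate helper scans per sub-partition with one fused pass that maintains an all-zero flag and a forbidden-adjacent-pair flag (pairs tested against a single set).
import Mathlib
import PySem

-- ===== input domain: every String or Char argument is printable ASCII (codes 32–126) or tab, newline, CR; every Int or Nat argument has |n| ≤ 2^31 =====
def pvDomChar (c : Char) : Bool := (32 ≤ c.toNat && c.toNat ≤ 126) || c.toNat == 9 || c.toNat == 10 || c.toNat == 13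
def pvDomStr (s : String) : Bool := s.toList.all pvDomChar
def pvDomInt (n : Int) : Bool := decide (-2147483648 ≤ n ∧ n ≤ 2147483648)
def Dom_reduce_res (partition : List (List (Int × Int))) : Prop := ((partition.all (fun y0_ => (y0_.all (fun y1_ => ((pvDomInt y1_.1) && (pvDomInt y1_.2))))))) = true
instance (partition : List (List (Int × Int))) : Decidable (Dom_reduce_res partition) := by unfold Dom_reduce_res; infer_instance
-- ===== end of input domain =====

-- B fuses A's four helper scans into one pass per sub-list; same return value.
-- Python A mutates `partition` in place (B does the same); the equivalence proved
-- here is about the returned pair (filtered list, mutated list as options).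

-- ===== PORT A =====
def checknull (p : List (Int × Int)) : Bool :=
  p.all (fun e => decide (e = (0, 0)))

def checknobrnull : List (Int × Int) → Bool
  | a :: b :: rest =>
      if a = (1, 0) ∧ b = (0, 0) then true else checknobrnull (b :: rest)
  | _ => false

def checknonullopt : List (Int × Int) → Bool
  | a :: b :: rest =>
      if a = (0, 0) ∧ b = (0, 1) then true else checknonullopt (b :: rest)
  | _ => false

def checknobothnull : List (Int × Int) → Bool
  | a :: b :: rest =>
      if a = (0, 0) ∧ b = (1, 1) then true
      else if a = (1, 1) ∧ b = (0, 0) then true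
      else checknobothnull (b :: rest)
  | _ => false

def reduce_res (partition : List (List (Int × Int))) : (List (List (Int × Int))) × (List (Option (List (Int × Int)))) :=
  -- the enumerate-loop nullifies each entry independently → map; the list
  -- comprehension over the mutated list → filterMap id
  let mutated := partition.map (fun p =>
    if checknull p || checknobrnull p || checknobothnull p || checknonullopt p
    then none else some p)
  (mutated.filterMap id, mutated)

-- ===== PORT B =====
def forb (a b : Int × Int) : Bool :=
  decide (a = (1, 0) ∧ b = (0, 0)) || decide (a = (0, 0) ∧ b = (0, 1)) ||
  decide (a = (0, 0) ∧ b = (1, 1)) || decide (a = (1, 1) ∧ b = (0, 0))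

-- the fused inner loop of B: carries (all_zero, found, prev)
def passB : List (Int × Int) → Bool → Bool → Option (Int × Int) → Bool × Bool
  | [], az, fd, _ => (az, fd)
  | e :: rest, az, fd, prev =>
      let az' := if e ≠ (0, 0) then false else az
      let fd' := if (match prev with | some pv => forb pv e | none => false) then true else fd
      passB rest az' fd' (some e)

def reduce_res_alt (partition : List (List (Int × Int))) : (List (List (Int × Int))) × (List (Option (List (Int × Int)))) :=
  let mutated := partition.map (fun p =>
    let (az, fd) := passB p true false none
    if az || fd then none else some p)
  (mutated.filterMap id, mutated)

-- ===== PRECONDITION & SPEC =====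
def Spec_reduce_res (partition : List (List (Int × Int))) (out : (List (List (Int × Int))) × (List (Option (List (Int × Int))))) : Prop := out = reduce_res_alt partition
instance (partition : List (List (Int × Int))) (out : (List (List (Int × Int))) × (List (Option (List (Int × Int))))) : Decidable (Spec_reduce_res partition out) := by unfold Spec_reduce_res; infer_instance

-- ===== CLAIM (what is proved, stated in full; the proofs are below) =====
def Claim_equal_reduce_res : Prop := ∀ (partition : List (List (Int × Int))), Dom_reduce_res partition → Spec_reduce_res partition (reduce_res partition)

-- ===== LEMMAS AND PROOFS =====

-- proof-side helper: "some adjacent pair of p is forbidden"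
def anyForb : List (Int × Int) → Bool
  | a :: b :: rest => forb a b || anyForb (b :: rest)
  | _ => false

-- (proof helper) Python's `if cond: flag = True` pattern as a Bool or
theorem if_true_or (c x : Bool) : (if c = true then true else x) = (c || x) := by
  cases c <;> simp

-- the fused pass, started with prev = some x, computes the all-zero check on p
-- and the forbidden-pair check on x :: p
theorem passB_some (p : List (Int × Int)) :
    ∀ (az fd : Bool) (x : Int × Int),
      passB p az fd (some x) = (az && checknull p, fd || anyForb (x :: p)) := by
  induction p with
  | nil => intro az fd x; simp [passB, checknull, anyForb]
  | cons e rest ih =>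
    intro az fd x
    simp only [passB, ih, anyForb, if_true_or]
    refine Prod.ext ?_ ?_
    · by_cases he : e = (0, 0) <;> simp [checknull, he]
    · cases forb x e <;> cases fd <;> simp

-- A's three pair scans together are exactly the single forbidden-pair scan
theorem anyForb_eq (p : List (Int × Int)) :
    (checknobrnull p || checknobothnull p || checknonullopt p) = anyForb p := by
  match p with
  | a :: b :: rest =>
    have ih := anyForb_eq (b :: rest)
    simp only [checknobrnull, checknobothnull, checknonullopt, anyForb]
    cases hr1 : checknobrnull (b :: rest) <;>
      cases hr2 : checknobothnull (b :: rest) <;>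
      cases hr3 : checknonullopt (b :: rest) <;>
        simp_all [forb, Bool.or_comm, Bool.or_assoc, Bool.or_left_comm]
  | [] => simp [checknobrnull, checknobothnull, checknonullopt, anyForb]
  | [a] => simp [checknobrnull, checknobothnull, checknonullopt, anyForb]

-- the per-sub-list predicates of the two ports agree
theorem null_eq (p : List (Int × Int)) :
    (checknull p || checknobrnull p || checknobothnull p || checknonullopt p) =
      ((passB p true false none).1 || (passB p true false none).2) := by
  cases p with
  | nil => simp [checknull, passB]
  | cons e rest =>
    have h : passB (e :: rest) true false none =
        ((if e ≠ (0, 0) then false else true) && checknull rest,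
         anyForb (e :: rest)) := by
      simp only [passB]
      rw [passB_some]
      simp
    rw [h]
    rw [← anyForb_eq (e :: rest)]
    by_cases he : e = (0, 0) <;>
      cases hr1 : checknobrnull (e :: rest) <;>
      cases hr2 : checknobothnull (e :: rest) <;>
      cases hr3 : checknonullopt (e :: rest) <;>
        simp_all [checknull]

-- ===== VERDICT (by name: the statement is the Claim_ definition above) =====
theorem reduce_res_spec : Claim_equal_reduce_res := by
  intro partition _
  show reduce_res partition = reduce_res_alt partition
  unfold reduce_res reduce_res_alt
  have hfun : (fun p : List (Int × Int) =>
      if checknull p || checknobrnull p || checknobothnull p || checknonullopt p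
      then (none : Option (List (Int × Int))) else some p) =
      (fun p : List (Int × Int) =>
        let (az, fd) := passB p true false none
        if az || fd then none else some p) := by
    funext p
    rw [null_eq p]
  simp only [hfun]
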